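-- pv_equiv track=rewrite | github.com/matire4/TPO_ProgramacionIII | algorithms/branch_and_bound/core.py | generar_movimientos_validos
-- ===== SOURCE A (Python) =====
-- from typing import Tuple, List, Optional, Set, Dict
--
-- MAX_CAP = 5
--
-- Color = str               # Representa un color (ej: "R", "G", "Y", "B", "O")
--
-- Pile  = Tuple[Color, ...] # Una pila = tupla de colores (de abajo hacia arriba)
--
-- State = Tuple[Pile, ...]  # Estado completo = tupla de todas las pilas
--
-- def top(p: Pile) -> Optional[Color]:
--     """Devuelve el color del tope (parte superior) de la pila."""
--     return p[-1] if p else None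
--
-- def pila_terminada(p: Pile) -> bool:
--     """Verifica si un PERNO está terminado (5 tuercas del mismo color)."""
--     if len(p) == MAX_CAP:
--         return all(x == p[0] for x in p)
--     return False
--
-- def puede_mover(p_src: Pile, p_dst: Pile) -> bool:
--     """Verifica si es legal mover una tuerca desde la pila origen a la pila destino."""
--     if not p_src:
--         return False
--     if len(p_dst) >= MAX_CAP:
--         return False
--     return (not p_dst) or (top(p_src) == top(p_dst))
--
-- def generar_movimientos_validos(s: State) -> List[Tuple[int, int]]:
--     """
--     Genera todos los movimientos válidos desde el estado s.
--
--     Similar a backtracking pero sin ordenamiento heurístico especial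
--     (el ordenamiento lo hace la cola de prioridad).
--     """
--     N = len(s)
--     movimientos = []
--
--     for i in range(N):
--         if pila_terminada(s[i]):
--             continue  # No mover desde pilas terminadas
--
--         for j in range(N):
--             if i == j:
--                 continue
--             if pila_terminada(s[j]):
--                 continue  # No mover hacia pilas terminadas
--
--             if puede_mover(s[i], s[j]):
--                 movimientos.append((i, j))
--
--     return movimientos
-- ===== SOURCE B (Python) =====
-- MAX_CAP = 5
--
-- def _merge(xs, ys):
--     """Merge two ascending, disjoint index lists into one ascending list."""
--     out = []
--     a, b = 0, 0
--     while a < len(xs) and b < len(ys):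
--         if xs[a] < ys[b]:
--             out.append(xs[a]); a += 1
--         else:
--             out.append(ys[b]); b += 1
--     out.extend(xs[a:])
--     out.extend(ys[b:])
--     return out
--
-- def generar_movimientos_validos(s):
--     N = len(s)
--     # Index the receivers once: empty piles, and non-full piles grouped by top color.
--     empties = []
--     by_color = {}
--     for j in range(N):
--         p = s[j]
--         if len(p) >= MAX_CAP:
--             continue  # a full pile can never receive
--         if not p:
--             empties.append(j)
--         else:
--             by_color.setdefault(p[-1], []).append(j)
--     movimientos = []
--     for i in range(N):
--         p = s[i]
--         if not p:
--             continue  # nothing to move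
--         if len(p) == MAX_CAP and all(x == p[0] for x in p):
--             continue  # finished pile
--         for j in _merge(empties, by_color.get(p[-1], [])):
--             if j != i:
--                 movimientos.append((i, j))
--     return movimientos
-- ===== Notes on version B (the rewrite author's own statement) =====
-- stated objective: faster
-- what changed: Instead of A's nested source-by-destination scan with a legality test per pair, B indexes the receivers once (sorted empty-pile list plus a dict from top color to sorted pile indices) and, per source, merges the two sorted index lists, emitting destinations in the same ascending order without scanning non-receiver piles.
import Mathlib
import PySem

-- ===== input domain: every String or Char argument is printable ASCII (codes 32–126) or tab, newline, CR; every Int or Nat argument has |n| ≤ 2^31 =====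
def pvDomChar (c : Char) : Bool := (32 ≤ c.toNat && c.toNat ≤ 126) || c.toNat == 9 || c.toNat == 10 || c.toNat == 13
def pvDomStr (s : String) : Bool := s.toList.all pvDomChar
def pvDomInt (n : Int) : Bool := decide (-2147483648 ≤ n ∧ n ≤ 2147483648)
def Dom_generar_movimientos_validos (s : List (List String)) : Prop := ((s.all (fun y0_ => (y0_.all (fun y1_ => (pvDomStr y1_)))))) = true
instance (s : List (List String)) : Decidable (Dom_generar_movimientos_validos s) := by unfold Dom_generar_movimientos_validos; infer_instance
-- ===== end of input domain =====

-- B replaces A's quadratic source×destination scan by a receiver index (empty piles + a dict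
-- keyed by top color) built once, merging the two sorted index lists per source (objective: faster; measurably so in a timing run).

-- ===== PORT A =====
def pyTop (p : List String) : Option String :=
  if p.isEmpty then none else PySem.List.pyGet? p (-1)

def pila_terminada (p : List String) : Bool :=
  if p.length == 5 then p.all (fun x => x == p.headI) else false

def puede_mover (src dst : List String) : Bool :=
  if src.isEmpty then false
  else if 5 ≤ dst.length then false
  else dst.isEmpty || (pyTop src == pyTop dst)

def generar_movimientos_validos (s : List (List String)) : List (Int × Int) :=
  let N := s.length
  (List.range N).foldl (fun movimientos i =>
    if pila_terminada (s.getD i []) then movimientos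
    else
      (List.range N).foldl (fun movimientos j =>
        if i == j then movimientos
        else if pila_terminada (s.getD j []) then movimientos
        else if puede_mover (s.getD i []) (s.getD j []) then
          movimientos ++ [((i : Int), (j : Int))]
        else movimientos) movimientos) []

-- ===== PORT B =====
-- merge of two ascending disjoint index lists (Source B's _merge, recursive form)
def mergeIdx : List Int → List Int → List Int
  | [], ys => ys
  | x :: xs, [] => x :: xs
  | x :: xs, y :: ys =>
    if x < y then x :: mergeIdx xs (y :: ys) else y :: mergeIdx (x :: xs) ys

-- p[-1] for a nonempty pile (Source B accesses p[-1] only when p is truthy)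
def topStr (p : List String) : String := (PySem.List.pyGet? p (-1)).getD ""

def generar_movimientos_validos_alt (s : List (List String)) : List (Int × Int) :=
  let N := s.length
  let idx := (List.range N).foldl (fun (st : List Int × PySem.Dict String (List Int)) j =>
      let p := s.getD j []
      if 5 ≤ p.length then st
      else if p.isEmpty then (st.1 ++ [(j : Int)], st.2)
      else (st.1, st.2.modify (topStr p) [] (· ++ [(j : Int)])))
    ([], PySem.Dict.empty)
  (List.range N).foldl (fun movimientos i =>
    let p := s.getD i []
    if p.isEmpty then movimientos
    else if p.length == 5 && p.all (fun x => x == p.headI) then movimientos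
    else (mergeIdx idx.1 (idx.2.getD (topStr p) [])).foldl
        (fun movimientos j =>
          if j != (i : Int) then movimientos ++ [((i : Int), j)] else movimientos)
        movimientos) []

-- ===== PRECONDITION & SPEC =====
def Spec_generar_movimientos_validos (s : List (List String)) (out : List (Int × Int)) : Prop := out = generar_movimientos_validos_alt s
instance (s : List (List String)) (out : List (Int × Int)) : Decidable (Spec_generar_movimientos_validos s out) := by unfold Spec_generar_movimientos_validos; infer_instance

-- ===== CLAIM (what is proved, stated in full; the proofs are below) =====
def Claim_equal_generar_movimientos_validos : Prop := ∀ (s : List (List String)), Dom_generar_movimientos_validos s → Spec_generar_movimientos_validos s (generar_movimientos_validos s)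

-- ===== LEMMAS AND PROOFS =====

-- the Bool predicates the two programs effectively filter by
def peB (s : List (List String)) (j : Nat) : Bool :=
  !decide (5 ≤ (s.getD j []).length) && (s.getD j []).isEmpty

def pcB (s : List (List String)) (c : String) (j : Nat) : Bool :=
  !decide (5 ≤ (s.getD j []).length) && !(s.getD j []).isEmpty && (topStr (s.getD j []) == c)

lemma pyTop_nonempty (p : List String) (h : p.isEmpty = false) :
    pyTop p = some (topStr p) := by
  have hne : p ≠ [] := by simpa [List.isEmpty_iff] using h
  have hl : 1 ≤ p.length := List.length_pos_iff.mpr hne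
  have hlt : p.length - 1 < p.length := by omega
  simp [pyTop, topStr, h, PySem.List.pyGet?, PySem.List.pyIdx?, hl, List.getElem?_eq_getElem hlt]

-- merge helpers: head smaller than everything on the other side comes out first
lemma mergeIdx_cons_right (xs : List Int) (y : Int) (ys : List Int)
    (h : ∀ x ∈ xs, y < x) : mergeIdx xs (y :: ys) = y :: mergeIdx xs ys := by
  cases xs with
  | nil => simp [mergeIdx]
  | cons x xs =>
    have : ¬ x < y := by have := h x (by simp); omega
    simp [mergeIdx, this]

lemma mergeIdx_cons_left (x : Int) (xs : List Int) (ys : List Int)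
    (h : ∀ y ∈ ys, x < y) : mergeIdx (x :: xs) ys = x :: mergeIdx xs ys := by
  cases ys with
  | nil => cases xs <;> simp [mergeIdx]
  | cons y ys =>
    have : x < y := h y (by simp)
    simp [mergeIdx, this]

-- merging the two disjoint filters of a strictly increasing list is the filter of the union
lemma mergeIdx_filter (P Q : Nat → Bool) (hdis : ∀ x, P x = true → Q x = false) :
    ∀ (l : List Nat), l.Pairwise (· < ·) →
      mergeIdx ((l.filter P).map (fun (j : Nat) => (j : Int))) ((l.filter Q).map (fun (j : Nat) => (j : Int)))
        = (l.filter (fun x => P x || Q x)).map (fun (j : Nat) => (j : Int)) := by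
  intro l
  induction l with
  | nil => intro _; simp [mergeIdx]
  | cons a l ih =>
    intro hp
    have ha : ∀ x ∈ l, a < x := fun x hx => (List.pairwise_cons.mp hp).1 x hx
    have hl := (List.pairwise_cons.mp hp).2
    by_cases hP : P a = true
    · have hQ : Q a = false := hdis a hP
      rw [List.filter_cons_of_pos hP, List.filter_cons_of_neg (by simp [hQ]),
        List.filter_cons_of_pos (by simp [hP])]
      rw [List.map_cons, List.map_cons, mergeIdx_cons_left _ _ _ ?_, ih hl]
      intro y hy
      obtain ⟨x, hx, rfl⟩ := List.mem_map.mp hy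
      exact_mod_cast ha x (List.mem_of_mem_filter hx)
    · by_cases hQ : Q a = true
      · rw [List.filter_cons_of_neg (by simp [hP]), List.filter_cons_of_pos hQ,
          List.filter_cons_of_pos (by simp [hQ])]
        rw [List.map_cons, List.map_cons, mergeIdx_cons_right _ _ _ ?_, ih hl]
        intro y hy
        obtain ⟨x, hx, rfl⟩ := List.mem_map.mp hy
        exact_mod_cast ha x (List.mem_of_mem_filter hx)
      · rw [List.filter_cons_of_neg (by simp [hP]), List.filter_cons_of_neg (by simp [hQ]),
          List.filter_cons_of_neg (by simp [hP, hQ]), ih hl]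

-- B's index-building fold, named so the invariants can be stated
def stepB (s : List (List String)) (st : List Int × PySem.Dict String (List Int)) (j : Nat) :
    List Int × PySem.Dict String (List Int) :=
  let p := s.getD j []
  if 5 ≤ p.length then st
  else if p.isEmpty then (st.1 ++ [(j : Int)], st.2)
  else (st.1, st.2.modify (topStr p) [] (· ++ [(j : Int)]))

lemma buildB_fst (s : List (List String)) :
    ∀ (l : List Nat) (e : List Int) (d : PySem.Dict String (List Int)),
      (l.foldl (stepB s) (e, d)).1 = e ++ (l.filter (peB s)).map (fun (j : Nat) => (j : Int)) := by
  intro l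
  induction l with
  | nil => intro e d; simp
  | cons a l ih =>
    intro e d
    by_cases h5 : 5 ≤ (s.getD a []).length
    · have hpe : peB s a = false := by
        simp only [peB, decide_eq_true h5, Bool.not_true, Bool.false_and]
      simp only [List.foldl_cons, stepB, if_pos h5]
      rw [ih, List.filter_cons_of_neg (by simp [hpe])]
    · by_cases he : (s.getD a []).isEmpty
      · have hpe : peB s a = true := by
          simp only [peB, decide_eq_false h5, Bool.not_false, Bool.true_and]; exact he
        simp only [List.foldl_cons, stepB, if_neg h5, if_pos he]
        rw [ih, List.filter_cons_of_pos hpe, List.map_cons]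
        simp
      · have hpe : peB s a = false := by
          simp only [peB, he, Bool.and_false]
        simp only [List.foldl_cons, stepB, if_neg h5, if_neg he]
        rw [ih, List.filter_cons_of_neg (by simp [hpe])]

lemma buildB_snd (s : List (List String)) (c : String) :
    ∀ (l : List Nat) (e : List Int) (d : PySem.Dict String (List Int)),
      (l.foldl (stepB s) (e, d)).2.getD c [] =
        d.getD c [] ++ (l.filter (pcB s c)).map (fun (j : Nat) => (j : Int)) := by
  intro l
  induction l with
  | nil => intro e d; simp
  | cons a l ih =>
    intro e d
    by_cases h5 : 5 ≤ (s.getD a []).length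
    · have hpc : pcB s c a = false := by
        simp only [pcB, decide_eq_true h5, Bool.not_true, Bool.false_and]
      simp only [List.foldl_cons, stepB, if_pos h5]
      rw [ih, List.filter_cons_of_neg (by simp [hpc])]
    · by_cases he : (s.getD a []).isEmpty
      · have hpc : pcB s c a = false := by
          simp only [pcB, he, Bool.not_true, Bool.and_false, Bool.false_and]
        simp only [List.foldl_cons, stepB, if_neg h5, if_pos he]
        rw [ih, List.filter_cons_of_neg (by simp [hpc])]
      · simp only [List.foldl_cons, stepB, if_neg h5, if_neg he]
        rw [ih]
        by_cases hc : topStr (s.getD a []) = c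
        · have hpc : pcB s c a = true := by
            simp only [pcB, decide_eq_false h5, Bool.not_false, Bool.true_and, hc]
            simp only [beq_self_eq_true, Bool.and_true]
            simpa using he
          rw [List.filter_cons_of_pos hpc,
            PySem.Dict.getD_modify, if_pos hc.symm, hc, List.map_cons]
          simp
        · have hpc : pcB s c a = false := by
            simp only [pcB, Bool.and_eq_false_iff]
            right
            simpa using hc
          rw [List.filter_cons_of_neg (by simp [hpc]),
            PySem.Dict.getD_modify, if_neg (fun h => hc h.symm)]

-- A's inner loop body in append-if shape
lemma bodyA_shape (s : List (List String)) (i : Nat) :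
    (fun (mov : List (Int × Int)) (j : Nat) =>
        if i == j then mov
        else if pila_terminada (s.getD j []) then mov
        else if puede_mover (s.getD i []) (s.getD j []) then mov ++ [((i : Int), (j : Int))]
        else mov)
      = fun mov j =>
        if (!(i == j) && !pila_terminada (s.getD j []) && puede_mover (s.getD i []) (s.getD j []))
          then mov ++ [((i : Int), (j : Int))] else mov := by
  funext mov j
  cases h1 : (i == j) <;> cases h2 : pila_terminada (s.getD j []) <;>
    cases h3 : puede_mover (s.getD i []) (s.getD j []) <;> simp_all

-- the per-source contribution of A as filter+map
def contribA (s : List (List String)) (i : Nat) : List (Int × Int) :=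
  if pila_terminada (s.getD i []) then []
  else ((List.range s.length).filter
      (fun j => !(i == j) && !pila_terminada (s.getD j []) && puede_mover (s.getD i []) (s.getD j []))).map
      (fun (j : Nat) => ((i : Int), (j : Int)))

lemma A_eq_flatMap (s : List (List String)) :
    generar_movimientos_validos s = (List.range s.length).flatMap (contribA s) := by
  show (List.range s.length).foldl _ [] = _
  rw [PySem.List.foldl_congr_mem _ _ (fun mov i => mov ++ contribA s i) _ ?_,
    PySem.List.foldl_append_eq_flatMap, List.nil_append]
  intro mov i _
  show (if pila_terminada (s.getD i []) then mov
      else (List.range s.length).foldl (fun movimientos j =>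
        if i == j then movimientos
        else if pila_terminada (s.getD j []) then movimientos
        else if puede_mover (s.getD i []) (s.getD j []) then movimientos ++ [((i : Int), (j : Int))]
        else movimientos) mov) = mov ++ contribA s i
  rw [bodyA_shape s i, PySem.List.foldl_append_if]
  simp only [contribA]
  by_cases h : pila_terminada (s.getD i [])
  · rw [if_pos h, if_pos h, List.append_nil]
  · rw [if_neg h, if_neg h]

-- the per-source contribution of B as filter+map
def contribB (s : List (List String)) (i : Nat) : List (Int × Int) :=
  if (s.getD i []).isEmpty then []
  else if (s.getD i []).length == 5 && (s.getD i []).all (fun x => x == (s.getD i []).headI) then []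
  else ((List.range s.length).filter
      (fun (j : Nat) => ((j : Int) != (i : Int)) && (peB s j || pcB s (topStr (s.getD i [])) j))).map
      (fun (j : Nat) => ((i : Int), (j : Int)))

lemma B_eq_flatMap (s : List (List String)) :
    generar_movimientos_validos_alt s = (List.range s.length).flatMap (contribB s) := by
  show (List.range s.length).foldl _ [] = _
  rw [PySem.List.foldl_congr_mem _ _ (fun mov i => mov ++ contribB s i) _ ?_,
    PySem.List.foldl_append_eq_flatMap, List.nil_append]
  intro mov i _
  show (if (s.getD i []).isEmpty then mov
      else if (s.getD i []).length == 5 && (s.getD i []).all (fun x => x == (s.getD i []).headI) then mov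
      else (mergeIdx ((List.range s.length).foldl (stepB s) ([], PySem.Dict.empty)).1
            (((List.range s.length).foldl (stepB s) ([], PySem.Dict.empty)).2.getD (topStr (s.getD i [])) [])).foldl
          (fun movimientos j =>
            if j != (i : Int) then movimientos ++ [((i : Int), j)] else movimientos) mov)
      = mov ++ contribB s i
  simp only [contribB]
  by_cases he : (s.getD i []).isEmpty
  · rw [if_pos he, if_pos he, List.append_nil]
  · rw [if_neg he, if_neg he]
    by_cases ht : ((s.getD i []).length == 5 && (s.getD i []).all (fun x => x == (s.getD i []).headI)) = true
    · rw [if_pos ht, if_pos ht, List.append_nil]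
    · rw [if_neg ht, if_neg ht]
      rw [buildB_fst s, buildB_snd s, PySem.Dict.getD_empty, List.nil_append, List.nil_append,
        mergeIdx_filter (peB s) (pcB s (topStr (s.getD i []))) (by
          intro x hx
          simp only [peB, Bool.and_eq_true] at hx
          simp only [pcB, List.isEmpty_iff.mp hx.2]
          simp) (List.range s.length) (List.pairwise_lt_range),
        PySem.List.foldl_append_if, List.filter_map, List.map_map, List.filter_filter]
      simp only [Function.comp_def]

-- pointwise equality of the two destination tests, for a nonempty source pile
lemma predX (s : List (List String)) (i j : Nat) (hne : (s.getD i []).isEmpty = false) :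
    (!pila_terminada (s.getD j []) && puede_mover (s.getD i []) (s.getD j []))
      = (peB s j || pcB s (topStr (s.getD i [])) j) := by
  by_cases h5 : 5 ≤ (s.getD j []).length
  · have hpm : puede_mover (s.getD i []) (s.getD j []) = false := by
      simp only [puede_mover, hne]
      rw [if_neg (by simp), if_pos h5]
    have hp : peB s j = false := by
      simp only [peB, decide_eq_true h5, Bool.not_true, Bool.false_and]
    have hc : pcB s (topStr (s.getD i [])) j = false := by
      simp only [pcB, decide_eq_true h5, Bool.not_true, Bool.false_and]
    rw [hpm, hp, hc, Bool.and_false, Bool.false_or]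
  · have hterm : pila_terminada (s.getD j []) = false := by
      simp only [pila_terminada]
      rw [if_neg (by simp only [beq_iff_eq]; omega)]
    have hpm : puede_mover (s.getD i []) (s.getD j [])
        = ((s.getD j []).isEmpty || (pyTop (s.getD i []) == pyTop (s.getD j []))) := by
      simp only [puede_mover, hne]
      rw [if_neg (by simp), if_neg h5]
    rw [hterm, Bool.not_false, Bool.true_and, hpm]
    by_cases hej : (s.getD j []).isEmpty
    · have hp : peB s j = true := by
        simp only [peB, decide_eq_false h5, Bool.not_false, Bool.true_and]
        exact hej
      rw [hej, hp, Bool.true_or, Bool.true_or]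
    · have hej' : (s.getD j []).isEmpty = false := by simpa using hej
      have hp : peB s j = false := by
        simp only [peB, hej', Bool.and_false]
      have hc : pcB s (topStr (s.getD i [])) j
          = (topStr (s.getD j []) == topStr (s.getD i []))  := by
        simp only [pcB, decide_eq_false h5, Bool.not_false, Bool.true_and, hej',
          Bool.not_false, Bool.true_and]
      rw [hej', hp, Bool.false_or, Bool.false_or, hc,
        pyTop_nonempty _ hne, pyTop_nonempty _ hej', Option.some_beq_some]
      exact Bool.beq_comm

-- the two contributions agree
lemma contrib_eq (s : List (List String)) (i : Nat) : contribA s i = contribB s i := by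
  simp only [contribA, contribB]
  by_cases he : (s.getD i []).isEmpty
  · rw [if_pos he, List.isEmpty_iff.mp he]
    simp [pila_terminada, puede_mover]
  · have hne : (s.getD i []).isEmpty = false := by simpa using he
    rw [if_neg he]
    by_cases ht : ((s.getD i []).length == 5 && (s.getD i []).all (fun x => x == (s.getD i []).headI)) = true
    · have hterm : pila_terminada (s.getD i []) = true := by
        simp only [pila_terminada]
        obtain ⟨h1, h2⟩ := Bool.and_eq_true_iff.mp ht
        rw [if_pos h1]
        exact h2
      rw [hterm, if_pos rfl, if_pos ht]
    · have hterm : pila_terminada (s.getD i []) = false := by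
        simp only [pila_terminada]
        by_cases h1 : ((s.getD i []).length == 5) = true
        · rw [if_pos h1]
          simp only [h1, Bool.true_and] at ht
          simpa using ht
        · rw [if_neg h1]
      rw [hterm, if_neg (by simp), if_neg ht]
      congr 1
      apply List.filter_congr
      intro j _
      have hbne : (!(i == j)) = ((j : Int) != (i : Int)) := by
        by_cases h : i = j
        · simp [h]
        · have h2 : ¬ (j : Int) = (i : Int) := by exact_mod_cast fun hh : j = i => h hh.symm
          simp only [bne]
          rw [beq_eq_false_iff_ne.mpr h, beq_eq_false_iff_ne.mpr h2]
      rw [Bool.and_assoc, hbne, predX s i j hne]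

-- ===== VERDICT (by name: the statement is the Claim_ definition above) =====
theorem generar_movimientos_validos_spec : Claim_equal_generar_movimientos_validos := by
  intro s _
  show generar_movimientos_validos s = generar_movimientos_validos_alt s
  rw [A_eq_flatMap, B_eq_flatMap]
  exact List.flatMap_congr (fun i _ => contrib_eq s i)
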